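-- pv_equiv track=rewrite | github.com/JoaoCarvalho99/Augbot | scripts/csvInterpreter.py | makeXticks
-- ===== SOURCE A (Python) =====
-- def makeXticks ( size ):
--     xticks = []
--     letter = ['A','B','C','D']
--     i = 0
--     turn = 0
--     while i < size:
--         j = 0
--         while j < 4 and i < size:
--             xticks.append ( letter[j]+str(turn) )
--             j += 1
--             i += 1
--         turn += 1
--     return xticks
-- ===== SOURCE B (Python) =====
-- def makeXticks(size):
--     letter = ['A', 'B', 'C', 'D']
--     xticks = []
--     i = 0
--     while i < size:
--         xticks.append(letter[i % 4] + str(i // 4))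
--         i += 1
--     return xticks
-- ===== Notes on version B (the rewrite author's own statement) =====
-- stated objective: simpler
-- what changed: Replaces A's nested while loops with maintained turn/j counters by a single flat loop over one counter i, computing the letter and number from i by divmod (i % 4, i // 4).
import Mathlib
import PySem

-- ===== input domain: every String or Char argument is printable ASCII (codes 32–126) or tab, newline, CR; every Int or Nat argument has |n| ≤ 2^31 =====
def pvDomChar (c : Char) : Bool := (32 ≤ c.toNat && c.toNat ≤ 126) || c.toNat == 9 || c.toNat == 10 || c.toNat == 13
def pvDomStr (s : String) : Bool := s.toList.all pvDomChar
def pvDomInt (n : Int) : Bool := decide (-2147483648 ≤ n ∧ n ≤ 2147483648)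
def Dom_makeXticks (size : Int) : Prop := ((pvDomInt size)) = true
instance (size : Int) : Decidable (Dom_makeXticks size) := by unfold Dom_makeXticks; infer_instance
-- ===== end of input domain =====

-- B replaces A's nested while loops (turn/j counters) by a single flat loop computing each
-- label from one counter i by divmod; objective: simpler. Return values proved equal for all sizes.
-- Both while loops are ported with a Nat fuel bound that only makes the recursion structural;
-- the fuel given at each call strictly exceeds the number of iterations the guards allow.

-- ===== PORT A =====
-- inner `while j < 4 and i < size` loop; returns (xticks, i). fuel 4 covers j = 0..3.
-- letter[j] is ported with pyGetD: the guard j < 4 (and j starting at 0) keeps j in range,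
-- so Python's IndexError is unreachable here.
def makeXticksInner (size : Int) : Nat → Int → Int → Int → List String → List String × Int
  | 0, _, i, _, acc => (acc, i)
  | fuel + 1, j, i, turn, acc =>
    if j < 4 ∧ i < size then
      makeXticksInner size fuel (j + 1) (i + 1) turn
        (acc ++ [PySem.List.pyGetD ["A", "B", "C", "D"] j "" ++ PySem.Int.toStr turn])
    else (acc, i)

-- outer `while i < size` loop of A; each iteration runs the inner loop from j = 0
def makeXticksOuter (size : Int) : Nat → Int → Int → List String → List String
  | 0, _, _, acc => acc
  | fuel + 1, i, turn, acc =>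
    if i < size then
      let r := makeXticksInner size 4 0 i turn acc
      makeXticksOuter size fuel r.2 (turn + 1) r.1
    else acc

def makeXticks (size : Int) : List String := makeXticksOuter size size.toNat 0 0 []

-- ===== PORT B =====
-- single flat loop: while i < size, append letter[i % 4] + str(i // 4)
def makeXticksAltLoop (size : Int) : Nat → Int → List String → List String
  | 0, _, acc => acc
  | fuel + 1, i, acc =>
    if i < size then
      makeXticksAltLoop size fuel (i + 1)
        (acc ++ [PySem.List.pyGetD ["A", "B", "C", "D"] (PySem.Int.mod i 4) "" ++
          PySem.Int.toStr (PySem.Int.floordiv i 4)])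
    else acc

def makeXticks_alt (size : Int) : List String := makeXticksAltLoop size size.toNat 0 []

-- ===== PRECONDITION & SPEC =====
def Spec_makeXticks (size : Int) (out : List String) : Prop := out = makeXticks_alt size
instance (size : Int) (out : List String) : Decidable (Spec_makeXticks size out) := by unfold Spec_makeXticks; infer_instance

-- ===== CLAIM (what is proved, stated in full; the proofs are below) =====
def Claim_equal_makeXticks : Prop := ∀ (size : Int), Dom_makeXticks size → Spec_makeXticks size (makeXticks size)

-- ===== LEMMAS AND PROOFS =====

theorem outer_stop (size : Int) (fuel : Nat) (i turn : Int) (acc : List String)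
    (h : ¬ i < size) : makeXticksOuter size fuel i turn acc = acc := by
  cases fuel with
  | zero => rfl
  | succ f => simp [makeXticksOuter, h]

-- under the invariant i = 4*turn + j (0 ≤ j < 4), one inner-loop step appends exactly B's entry for i
theorem inner_step_entry (i turn j : Int) (h0 : 0 ≤ j) (h4 : j < 4) (hi : i = 4 * turn + j) :
    PySem.List.pyGetD ["A", "B", "C", "D"] (PySem.Int.mod i 4) "" ++
      PySem.Int.toStr (PySem.Int.floordiv i 4)
    = PySem.List.pyGetD ["A", "B", "C", "D"] j "" ++ PySem.Int.toStr turn := by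
  rw [PySem.Int.mod_eq_emod_of_pos (a := i) (by omega : (0:Int) < 4),
      PySem.Int.floordiv_eq_ediv_of_pos (a := i) (by omega : (0:Int) < 4)]
  have hm : i % 4 = j := by omega
  have hd : i / 4 = turn := by omega
  rw [hm, hd]

-- running the inner loop to its stop mirrors a prefix of B's flat loop (alt fuel kept canonical)
theorem inner_run (size : Int) : ∀ (fj : Nat) (j i turn : Int) (acc : List String),
    0 ≤ j → j + (fj : Int) = 4 → i = 4 * turn + j →
    ∃ i' acc', makeXticksInner size fj j i turn acc = (acc', i') ∧
      makeXticksAltLoop size (size - i).toNat i acc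
        = makeXticksAltLoop size (size - i').toNat i' acc' ∧
      (i' = 4 * (turn + 1) ∨ size ≤ i') ∧
      (i < size ∧ 0 < fj → i + 1 ≤ i') := by
  intro fj
  induction fj with
  | zero =>
    intro j i turn acc h0 hf hi
    exact ⟨i, acc, rfl, rfl, by omega, by omega⟩
  | succ f ih =>
    intro j i turn acc h0 hf hi
    by_cases h : i < size
    · have hg : j < 4 ∧ i < size := ⟨by push_cast at hf; omega, h⟩
      rw [makeXticksInner, if_pos hg]
      obtain ⟨i', acc', h1, h2, h3, h4⟩ := ih (j + 1) (i + 1) turn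
        (acc ++ [PySem.List.pyGetD ["A", "B", "C", "D"] j "" ++ PySem.Int.toStr turn])
        (by omega) (by push_cast at hf ⊢; omega) (by omega)
      refine ⟨i', acc', h1, ?_, h3, by omega⟩
      have hm : (size - i).toNat = ((size - (i + 1)).toNat) + 1 := by omega
      rw [hm, makeXticksAltLoop, if_pos h, inner_step_entry i turn j h0 hg.1 hi]
      exact h2
    · rw [makeXticksInner, if_neg (by tauto)]
      exact ⟨i, acc, rfl, rfl, by omega, by omega⟩

-- the whole outer loop equals the flat loop run with its canonical fuel
theorem outer_eq_alt (size : Int) : ∀ (fuel : Nat) (i turn : Int) (acc : List String),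
    (size - i).toNat ≤ fuel → i = 4 * turn →
    makeXticksOuter size fuel i turn acc = makeXticksAltLoop size (size - i).toNat i acc := by
  intro fuel
  induction fuel with
  | zero =>
    intro i turn acc hn hi
    have h0 : (size - i).toNat = 0 := by omega
    rw [outer_stop size 0 i turn acc (by omega), h0]
    rfl
  | succ f ih =>
    intro i turn acc hn hi
    by_cases h : i < size
    · rw [makeXticksOuter, if_pos h]
      obtain ⟨i', acc', h1, h2, h3, h4⟩ := inner_run size 4 0 i turn acc
        (by omega) (by norm_num) (by omega)
      have hstep : i + 1 ≤ i' := h4 ⟨h, by omega⟩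
      simp only [h1, h2]
      rcases h3 with h3 | h3
      · exact ih i' (turn + 1) acc' (by omega) (by omega)
      · have h0 : (size - i').toNat = 0 := by omega
        rw [outer_stop size f i' (turn + 1) acc' (by omega), h0]
        rfl
    · have h0 : (size - i).toNat = 0 := by omega
      rw [makeXticksOuter, if_neg h, h0]
      rfl

-- ===== VERDICT (by name: the statement is the Claim_ definition above) =====
theorem makeXticks_spec : Claim_equal_makeXticks := by
  intro size _
  unfold Spec_makeXticks makeXticks makeXticks_alt
  rw [outer_eq_alt size size.toNat 0 0 [] (by omega) (by omega)]
  congr 1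
  omega
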